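-- pv_equiv track=rewrite | github.com/jetfan-xin/SimultaneousTranslation | utils/experiments/build_error_span_prompt.py | infer_lang_pair
-- ===== SOURCE A (Python) =====
-- def infer_lang_pair(name: str):
--     parts = name.replace(".", "_").split("_")
--     for part in parts:
--         if "-" in part:
--             items = part.split("-")
--             if len(items) == 2:
--                 return items[0], items[1]
--     return None, None
-- ===== SOURCE B (Python) =====
-- def infer_lang_pair(name: str):
--     # One streaming pass over the characters (with a '_' sentinel) instead of
--     # replace+split+rescan: track the current token's dash count and its two halves.
--     pre, post, dashes = [], [], 0
--     for ch in name + "_":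
--         if ch == "." or ch == "_":
--             if dashes == 1:
--                 return "".join(pre), "".join(post)
--             pre, post, dashes = [], [], 0
--         elif ch == "-":
--             dashes += 1
--         elif dashes == 0:
--             pre.append(ch)
--         elif dashes == 1:
--             post.append(ch)
--     return None, None
-- ===== Notes on version B (the rewrite author's own statement) =====
-- stated objective: alternative
-- what changed: Replaces A's replace('.','_') + split('_') + per-part split('-') rescans with a single left-to-right character scan (with an end-of-string sentinel) that tracks the current token's dash count and its two halves directly.
import Mathlib
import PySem

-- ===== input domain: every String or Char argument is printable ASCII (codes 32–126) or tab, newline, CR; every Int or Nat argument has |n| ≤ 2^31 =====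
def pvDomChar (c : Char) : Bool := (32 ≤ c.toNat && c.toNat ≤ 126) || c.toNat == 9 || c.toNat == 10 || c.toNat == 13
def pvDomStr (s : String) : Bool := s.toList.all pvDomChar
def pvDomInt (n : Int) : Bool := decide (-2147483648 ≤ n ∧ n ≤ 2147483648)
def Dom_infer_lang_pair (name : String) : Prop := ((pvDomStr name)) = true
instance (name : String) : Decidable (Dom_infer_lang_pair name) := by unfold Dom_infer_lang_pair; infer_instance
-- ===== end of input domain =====

-- B replaces A's replace+split+rescan pipeline with one character scan keeping a dash
-- count and the two halves of the current token (objective: alternative decomposition).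

-- ===== PORT A =====
-- the 'for part in parts' loop of A
def aLoop : List String → Option String × Option String
  | [] => (none, none)
  | p :: ps =>
    if PySem.Str.isIn "-" p then
      let items := (PySem.Str.split? p "-").getD []   -- sep "-" is nonempty: Python's split never raises here
      if items.length = 2 then (items[0]?, items[1]?) else aLoop ps
    else aLoop ps

def infer_lang_pair (name : String) : Option String × Option String :=
  let parts := (PySem.Str.split? (PySem.Str.replace name "." "_") "_").getD []   -- sep "_" nonempty
  aLoop parts

-- ===== PORT B =====
-- the 'for ch in name + "_"' loop of B, state = (pre, post, dashes)
def altGo : List Char → List Char → List Char → Nat → Option String × Option String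
  | [], _, _, _ => (none, none)
  | c :: rest, pre, post, d =>
    if c = '.' ∨ c = '_' then
      if d = 1 then (some (String.ofList pre), some (String.ofList post))
      else altGo rest [] [] 0
    else if c = '-' then altGo rest pre post (d + 1)
    else if d = 0 then altGo rest (pre ++ [c]) post d
    else if d = 1 then altGo rest pre (post ++ [c]) d
    else altGo rest pre post d

def infer_lang_pair_alt (name : String) : Option String × Option String :=
  altGo (name.toList ++ ['_']) [] [] 0

-- ===== PRECONDITION & SPEC =====
def Spec_infer_lang_pair (name : String) (out : Option String × Option String) : Prop := out = infer_lang_pair_alt name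
instance (name : String) (out : Option String × Option String) : Decidable (Spec_infer_lang_pair name out) := by unfold Spec_infer_lang_pair; infer_instance

-- ===== CLAIM (what is proved, stated in full; the proofs are below) =====
def Claim_equal_infer_lang_pair : Prop := ∀ (name : String), Dom_infer_lang_pair name → Spec_infer_lang_pair name (infer_lang_pair name)

-- ===== LEMMAS AND PROOFS =====

-- map '.' to '_' (what A's replace does)
def fRepl (c : Char) : Char := if c = '.' then '_' else c

-- head-style splitter on a single separator char; result is (first token, remaining tokens)
def tokC (ch : Char) : List Char → List Char × List (List Char)
  | [] => ([], [])
  | c :: cs =>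
    let (t, ts) := tokC ch cs
    if c = ch then ([], t :: ts) else (c :: t, ts)

-- B's per-token state transition
def scanTok : List Char → List Char × List Char × Nat → List Char × List Char × Nat
  | [], st => st
  | c :: t, (pre, post, d) =>
    scanTok t (if c = '-' then (pre, post, d + 1)
               else if d = 0 then (pre ++ [c], post, d)
               else if d = 1 then (pre, post ++ [c], d)
               else (pre, post, d))

-- token-level rendering of B's loop
def procTok : List (List Char) → List Char → List Char → Nat → Option String × Option String
  | [], _, _, _ => (none, none)
  | t :: ts, pre, post, d =>
    let (pre', post', d') := scanTok t (pre, post, d)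
    if d' = 1 then (some (String.ofList pre'), some (String.ofList post'))
    else procTok ts [] [] 0

theorem replace_go_spec (l : List Char) : ∀ (fuel : Nat) (acc : List Char), l.length ≤ fuel →
    PySem.Chars.replace.go ['.'] ['_'] fuel l acc = acc.reverse ++ l.map fRepl := by
  induction l with
  | nil =>
    intro fuel acc _
    cases fuel <;> simp [PySem.Chars.replace.go]
  | cons c cs ih =>
    intro fuel acc h
    cases fuel with
    | zero => simp at h
    | succ f =>
      by_cases hc : c = '.'
      · subst hc
        rw [PySem.Chars.replace.go]
        simp only [List.isPrefixOf]
        rw [if_pos (by simp)]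
        simp only [List.length_cons, List.length_nil, List.drop_succ_cons, List.drop_zero]
        rw [ih f _ (by simpa using h)]
        simp [fRepl]
      · rw [PySem.Chars.replace.go]
        rw [if_neg (by simp [List.isPrefixOf_iff_prefix, List.prefix_cons_iff]; exact fun h => hc h.symm)]
        rw [ih f _ (by simpa using h)]
        simp [fRepl, hc]

theorem replace_singleton (cs : List Char) :
    PySem.Chars.replace cs ['.'] ['_'] = cs.map fRepl := by
  rw [PySem.Chars.replace]
  rw [if_neg (by simp)]
  exact replace_go_spec cs cs.length [] le_rfl

theorem splitOn_go_spec (ch : Char) (l : List Char) :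
    ∀ (fuel : Nat) (cur : List Char) (acc : List (List Char)), l.length ≤ fuel →
    PySem.Chars.splitOn.go [ch] fuel l cur acc
      = acc.reverse ++ ((cur.reverse ++ (tokC ch l).1) :: (tokC ch l).2) := by
  induction l with
  | nil =>
    intro fuel cur acc _
    cases fuel <;> simp [PySem.Chars.splitOn.go, tokC]
  | cons c cs ih =>
    intro fuel cur acc h
    cases fuel with
    | zero => simp at h
    | succ f =>
      by_cases hc : c = ch
      · subst hc
        rw [PySem.Chars.splitOn.go]
        rw [if_pos (by simp)]
        simp only [List.length_cons, List.length_nil, List.drop_succ_cons, List.drop_zero]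
        rw [ih f _ _ (by simpa using h)]
        simp [tokC]
      · rw [PySem.Chars.splitOn.go]
        rw [if_neg (by simp [List.isPrefixOf_iff_prefix, List.prefix_cons_iff]; exact fun h => hc h.symm)]
        rw [ih f _ _ (by simpa using h)]
        simp [tokC, hc]

theorem splitOn_singleton (ch : Char) (cs : List Char) :
    PySem.Chars.splitOn cs [ch] = (tokC ch cs).1 :: (tokC ch cs).2 := by
  rw [PySem.Chars.splitOn]
  rw [splitOn_go_spec ch cs (cs.length + 1) [] [] (by omega)]
  simp

theorem tokC_len (ch : Char) (t : List Char) : (tokC ch t).2.length = t.count ch := by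
  induction t with
  | nil => simp [tokC]
  | cons c cs ih =>
    by_cases hc : c = ch
    · subst hc; simp [tokC, ih]
    · simp [tokC, hc, ih]

theorem tokC_append_no_sep (ch : Char) (u r : List Char) (hu : ch ∉ u) :
    tokC ch (u ++ r) = (u ++ (tokC ch r).1, (tokC ch r).2) := by
  induction u with
  | nil => simp
  | cons c cs ih =>
    simp only [List.mem_cons, not_or] at hu
    simp [tokC, ih hu.2, Ne.symm, hu.1]

theorem scanTok_append (a b : List Char) (st : List Char × List Char × Nat) :
    scanTok (a ++ b) st = scanTok b (scanTok a st) := by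
  induction a generalizing st with
  | nil => simp [scanTok]
  | cons c t ih => obtain ⟨pre, post, d⟩ := st; simp [scanTok, ih]

theorem scanTok_dashes (t : List Char) : ∀ (pre post : List Char) (d : Nat),
    (scanTok t (pre, post, d)).2.2 = d + t.count '-' := by
  induction t with
  | nil => intro pre post d; simp [scanTok]
  | cons c cs ih =>
    intro pre post d
    by_cases hc : c = '-'
    · subst hc; simp [scanTok, ih]; omega
    · simp only [scanTok, if_neg hc]
      rcases Nat.lt_or_ge d 2 with hd | hd
      · interval_cases d <;> simp [ih, hc]
      · rw [if_neg (by omega), if_neg (by omega)]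
        simp [ih, hc]
  
theorem scanTok_no_dash_d0 (u : List Char) (hu : '-' ∉ u) : ∀ (pre post : List Char),
    scanTok u (pre, post, 0) = (pre ++ u, post, 0) := by
  induction u with
  | nil => intro pre post; simp [scanTok]
  | cons c cs ih =>
    intro pre post
    simp only [List.mem_cons, not_or] at hu
    simp [scanTok, Ne.symm, hu.1, ih hu.2]

theorem scanTok_no_dash_d1 (v : List Char) (hv : '-' ∉ v) : ∀ (pre post : List Char),
    scanTok v (pre, post, 1) = (pre, post ++ v, 1) := by
  induction v with
  | nil => intro pre post; simp [scanTok]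
  | cons c cs ih =>
    intro pre post
    simp only [List.mem_cons, not_or] at hv
    simp [scanTok, Ne.symm, hv.1, ih hv.2]

-- a list with exactly one occurrence of a splits around it
theorem count_eq_one_split {α : Type} [DecidableEq α] (a : α) (t : List α) (h : t.count a = 1) :
    ∃ u v, t = u ++ a :: v ∧ a ∉ u ∧ a ∉ v := by
  induction t with
  | nil => simp at h
  | cons c cs ih =>
    by_cases hc : c = a
    · subst hc
      refine ⟨[], cs, by simp, by simp, ?_⟩
      simp at h
      exact (List.count_eq_zero.mp h)
    · simp [hc] at h
      obtain ⟨u, v, rfl, hu, hv⟩ := ih (by simpa [List.count_cons] using h)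
      exact ⟨c :: u, v, rfl, by simp [hu]; exact fun h => hc h.symm, hv⟩

-- B's loop over chars equals the token-level loop over A's tokens of the dot-mapped string
theorem altGo_eq (cs : List Char) : ∀ (pre post : List Char) (d : Nat),
    altGo (cs ++ ['_']) pre post d
      = procTok ((tokC '_' (cs.map fRepl)).1 :: (tokC '_' (cs.map fRepl)).2) pre post d := by
  induction cs with
  | nil =>
    intro pre post d
    simp only [List.nil_append, List.map_nil]
    by_cases hd : d = 1 <;> simp [altGo, tokC, procTok, scanTok, hd]
  | cons c cs ih =>
    intro pre post d
    by_cases hsep : c = '.' ∨ c = '_'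
    · have hf : fRepl c = '_' := by rcases hsep with h | h <;> simp [fRepl, h]
      by_cases hd : d = 1
      · subst hd
        simp [altGo, hsep, hf, tokC, procTok, scanTok]
      · simp only [List.cons_append, altGo, if_pos hsep, if_neg hd, List.map_cons, hf, tokC]
        rw [ih [] [] 0]
        simp [procTok, scanTok, hd]
    · have hf : fRepl c = c := by
        simp only [not_or] at hsep; simp [fRepl, hsep.1]
      have hne : ¬ c = '_' := by simp only [not_or] at hsep; exact hsep.2
      by_cases hdash : c = '-'
      · simp only [List.cons_append, altGo, if_neg hsep, if_pos hdash, List.map_cons, hf, tokC,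
          if_neg hne]
        rw [ih pre post (d + 1)]
        simp [procTok, scanTok, hdash]
      · rcases Nat.lt_or_ge d 2 with hd2 | hd2
        · interval_cases d
          · simp only [List.cons_append, altGo, if_neg hsep, if_neg hdash]
            simp only [if_true]
            rw [ih (pre ++ [c]) post 0]
            simp [procTok, scanTok, hdash, tokC, hf, hne]
          · simp only [List.cons_append, altGo, if_neg hsep, if_neg hdash]
            simp only [if_true]
            rw [ih pre (post ++ [c]) 1]
            simp [procTok, scanTok, hdash, tokC, hf, hne]
        · simp only [List.cons_append, altGo, if_neg hsep, if_neg hdash]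
          rw [if_neg (by omega), if_neg (by omega), ih pre post d]
          simp only [List.map_cons, hf, tokC, if_neg hne]
          simp [procTok, scanTok, hdash, if_neg (by omega : ¬ d = 0), if_neg (by omega : ¬ d = 1)]

-- singleton-infix is membership
theorem singleton_infix_iff {α : Type} (a : α) (l : List α) : [a] <:+: l ↔ a ∈ l := by
  constructor
  · rintro ⟨s, t, rfl⟩; simp
  · intro h
    obtain ⟨s, t, rfl⟩ := List.append_of_mem h
    exact ⟨s, t, by simp⟩

-- A's string loop over the tokens equals the token-level rendering of B's loop
theorem aLoop_eq (toks : List (List Char)) :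
    aLoop (toks.map String.ofList) = procTok toks [] [] 0 := by
  induction toks with
  | nil => simp [aLoop, procTok]
  | cons t ts ih =>
    have htl : (String.ofList t).toList = t := by simp
    by_cases hmem : '-' ∈ t
    · have hin : PySem.Str.isIn "-" (String.ofList t) = true := by
        rw [PySem.Str.isIn_iff_infix]
        simpa [htl] using (singleton_infix_iff '-' t).mpr hmem
      have hsplit : (PySem.Str.split? (String.ofList t) "-").getD []
          = ((tokC '-' t).1 :: (tokC '-' t).2).map String.ofList := by
        simp [PySem.Str.split?, PySem.Chars.split?, htl, splitOn_singleton]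
      rcases hcnt : t.count '-' with _ | n
      · exact absurd (List.count_eq_zero.mp hcnt) (by simpa using hmem)
      rcases n with _ | m
      · -- exactly one dash: both return the two halves
        obtain ⟨u, v, rfl, hu, hv⟩ := count_eq_one_split '-' t hcnt
        have htok : tokC '-' (u ++ '-' :: v) = (u, [v]) := by
          rw [tokC_append_no_sep '-' u _ hu]
          have hvtok : tokC '-' v = (v, []) := by
            simpa [tokC] using tokC_append_no_sep '-' v [] hv
          simp [tokC, hvtok]
        have hscan : scanTok (u ++ '-' :: v) ([], [], 0) = (u, v, 1) := by
          rw [scanTok_append]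
          rw [scanTok_no_dash_d0 u hu]
          show scanTok ('-' :: v) _ = _
          simp [scanTok, scanTok_no_dash_d1 v hv]
        simp only [List.map_cons, aLoop, if_pos hin, hsplit, htok]
        simp [procTok, hscan]
      · -- two or more dashes: A's len check fails, B's dash count is ≠ 1; both skip the token
        have hlen : ((PySem.Str.split? (String.ofList t) "-").getD []).length = m + 3 := by
          rw [hsplit]; simp [tokC_len, hcnt]
        have hd : (scanTok t ([], [], 0)).2.2 = m + 2 := by
          rw [scanTok_dashes]; simpa using hcnt
        simp only [List.map_cons, aLoop, if_pos hin, hlen]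
        rw [if_neg (by omega)]
        rw [ih]
        simp only [procTok]
        rcases hst : scanTok t ([], [], 0) with ⟨p', q', d'⟩
        rw [hst] at hd
        simp only at hd
        simp [hd]
    · -- no dash: A's membership test fails, B's dash count is 0
      have hin : ¬ PySem.Str.isIn "-" (String.ofList t) = true := by
        rw [PySem.Str.isIn_iff_infix]
        simpa [htl] using fun h => hmem ((singleton_infix_iff '-' t).mp h)
      have hd : (scanTok t ([], [], 0)).2.2 = 0 := by
        rw [scanTok_dashes]
        simpa using List.count_eq_zero.mpr hmem
      simp only [List.map_cons, aLoop, if_neg hin]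
      rw [ih]
      simp only [procTok]
      rcases hst : scanTok t ([], [], 0) with ⟨p', q', d'⟩
      rw [hst] at hd
      simp only at hd
      simp [hd]

-- puts the two top-level lemmas together
theorem main_eq (name : String) : infer_lang_pair name = infer_lang_pair_alt name := by
  have hrepl : (PySem.Str.replace name "." "_").toList = name.toList.map fRepl := by
    simp [PySem.Str.toList_replace, replace_singleton]
  have hparts : (PySem.Str.split? (PySem.Str.replace name "." "_") "_").getD []
      = ((tokC '_' (name.toList.map fRepl)).1 :: (tokC '_' (name.toList.map fRepl)).2).map String.ofList := by
    simp [PySem.Str.split?, PySem.Chars.split?, hrepl, splitOn_singleton]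
  show aLoop _ = _
  rw [hparts, aLoop_eq]
  rw [infer_lang_pair_alt, altGo_eq]

-- ===== VERDICT (by name: the statement is the Claim_ definition above) =====
theorem infer_lang_pair_spec : Claim_equal_infer_lang_pair := by
  intro name _
  unfold Spec_infer_lang_pair
  exact main_eq name
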